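-- pv_equiv track=rewrite | github.com/xxxxlc/leetcode | BFS/maxDistance.py | maxDistance
-- ===== SOURCE A (Python) =====
-- def maxDistance(grid):
--     """
--     :type grid: List[List[int]]
--     :rtype: int
--     """
--     q = []
--     visit = [[0 for _ in range(len(grid[0]))] for _ in range(len(grid))]
--     directions = [[1, 0], [-1, 0], [0, 1], [0, -1]]
--
--     for i in range(len(grid)):
--         for j in range(len(grid[0])):
--             if grid[i][j] == 1:
--                 q.append([i, j])
--
--     if not q:
--         return -1
--     if len(q) == len(grid[0]) * len(grid):
--         return -1
--
--     depth = 0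
--     while(q):
--         size = len(q)
--
--         for k in range(size):
--             cur = q.pop(0)
--
--             for d in directions:
--                 x = cur[0] + d[0]
--                 y = cur[1] + d[1]
--
--                 if 0 <= x < len(grid) and 0 <= y < len(grid[0]) and grid[x][y] == 0 and visit[x][y] == 0:
--                     visit[x][y] = 1
--                     q.append([x, y])
--
--         depth += 1
--
--     return depth - 1
-- ===== SOURCE B (Python) =====
-- def maxDistance(grid):
--     """
--     :type grid: List[List[int]]
--     :rtype: int
--     """
--     n, m = len(grid), len(grid[0])
--     land = [(i, j) for i in range(n) for j in range(m) if grid[i][j] == 1]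
--     if not land or len(land) == n * m:
--         return -1
--     INF = n * m + 1
--     dp = [[0 if grid[i][j] == 1 else INF for j in range(m)] for i in range(n)]
--     for _ in range(n * m):
--         ndp = [[min([dp[i][j]] + [dp[x][y] + 1
--                      for (x, y) in ((i - 1, j), (i + 1, j), (i, j - 1), (i, j + 1))
--                      if 0 <= x < n and 0 <= y < m])
--                 if grid[i][j] == 0 else dp[i][j]
--                 for j in range(m)] for i in range(n)]
--         if ndp == dp:
--             break
--         dp = ndp
--     return max(v for row in dp for v in row if v < INF)
-- ===== Notes on version B (the rewrite author's own statement) =====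
-- stated objective: alternative
-- what changed: Replaces the multi-source BFS (FIFO queue with O(|q|) pop(0), per-layer size counter, mutable visit matrix) by a Bellman-Ford-style distance transform: a dp matrix holding 0 on land and the sentinel n*m+1 elsewhere is repeatedly relaxed from its four neighbours until it stops changing, and the answer is the largest finite dp entry.
-- outside the precondition, e.g. on maxDistance([]): A returns -1, B raises IndexError
import Mathlib
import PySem

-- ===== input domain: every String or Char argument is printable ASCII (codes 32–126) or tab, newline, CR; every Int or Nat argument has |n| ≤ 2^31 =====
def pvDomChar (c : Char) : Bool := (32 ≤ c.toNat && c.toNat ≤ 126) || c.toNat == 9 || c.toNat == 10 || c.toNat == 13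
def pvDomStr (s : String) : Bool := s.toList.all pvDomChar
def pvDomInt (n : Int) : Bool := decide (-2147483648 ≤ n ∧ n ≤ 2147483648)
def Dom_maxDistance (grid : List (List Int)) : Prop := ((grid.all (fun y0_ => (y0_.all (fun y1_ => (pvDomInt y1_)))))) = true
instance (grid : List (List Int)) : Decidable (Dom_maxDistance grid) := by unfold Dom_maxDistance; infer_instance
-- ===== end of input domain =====

-- B replaces A's multi-source BFS (FIFO queue, layer counter, visit matrix) by a Bellman-Ford
-- style distance transform: a dp matrix relaxed from its four neighbours until it stops
-- changing, the answer being the largest finite dp entry; equal return values proved.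

-- ===== PORT A =====

-- grid[x][y] (total form; in-range at every use admitted by Pre_)
def pvCell (grid : List (List Int)) (x y : Int) : Int :=
  PySem.List.pyGetD (PySem.List.pyGetD grid x []) y 0

def pvDirs : List (Int × Int) := [(1, 0), (-1, 0), (0, 1), (0, -1)]

-- visit[x][y] = 1
def pvVisSet (v : List (List Int)) (x y : Int) : List (List Int) :=
  PySem.List.pySetD v x (PySem.List.pySetD (PySem.List.pyGetD v x []) y 1)

-- body of A's inner direction loop, at candidate cell p = (x, y)
def pvMark (grid : List (List Int)) (n m : Int) (st : List (Int × Int) × List (List Int))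
    (p : Int × Int) : List (Int × Int) × List (List Int) :=
  if 0 ≤ p.1 ∧ p.1 < n ∧ 0 ≤ p.2 ∧ p.2 < m ∧ pvCell grid p.1 p.2 = 0 ∧ pvCell st.2 p.1 p.2 = 0 then
    (st.1 ++ [p], pvVisSet st.2 p.1 p.2)
  else st

-- 'for d in directions: x = cur[0]+d[0]; y = cur[1]+d[1]; …'
def pvExpand (grid : List (List Int)) (n m : Int) (cur : Int × Int)
    (st : List (Int × Int) × List (List Int)) : List (Int × Int) × List (List Int) :=
  pvDirs.foldl (fun st d => pvMark grid n m st (cur.1 + d.1, cur.2 + d.2)) st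

-- 'for k in range(size): cur = q.pop(0); …'  ([] case unreachable: size = len(q))
def pvRunLayer (grid : List (List Int)) (n m : Int) :
    Nat → List (Int × Int) → List (List Int) → List (Int × Int) × List (List Int)
  | 0, q, v => (q, v)
  | k + 1, q, v =>
    match q with
    | [] => ([], v)
    | cur :: rest =>
      let st := pvExpand grid n m cur (rest, v)
      pvRunLayer grid n m k st.1 st.2

-- 'while(q): …; depth += 1' (fuel only makes the loop total; n*m+2 rounds always suffice)
def pvBfsA (grid : List (List Int)) (n m : Int) :
    Nat → List (Int × Int) → List (List Int) → Int → Int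
  | 0, _, _, depth => depth - 1
  | fuel + 1, q, v, depth =>
    if q = [] then depth - 1
    else
      let st := pvRunLayer grid n m q.length q v
      pvBfsA grid n m fuel st.1 st.2 (depth + 1)

def maxDistance (grid : List (List Int)) : Int :=
  let n : Int := grid.length
  let m : Int := (PySem.List.pyGetD grid 0 []).length
  let q : List (Int × Int) :=
    (PySem.List.pyRange 0 n 1).foldl (fun q i =>
      (PySem.List.pyRange 0 m 1).foldl (fun q j =>
        if pvCell grid i j = 1 then q ++ [(i, j)] else q) q) []
  let visit : List (List Int) :=
    (PySem.List.pyRange 0 n 1).map (fun _ => (PySem.List.pyRange 0 m 1).map (fun _ => (0 : Int)))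
  if q = [] then -1
  else if (q.length : Int) = m * n then -1
  else pvBfsA grid n m (grid.length * (PySem.List.pyGetD grid 0 []).length + 2) q visit 0

-- ===== PORT B =====

-- the comprehension '[(i, j) for i in range(n) for j in range(m) if grid[i][j] == c]'
def pvCellsEq (grid : List (List Int)) (n m c : Int) : List (Int × Int) :=
  (PySem.List.pyRange 0 n 1).flatMap (fun i =>
    ((PySem.List.pyRange 0 m 1).filter (fun j => decide (pvCell grid i j = c))).map (fun j => (i, j)))

-- the four neighbour candidates ((i-1,j),(i+1,j),(i,j-1),(i,j+1))
def pvNbr4 (i j : Int) : List (Int × Int) := [(i - 1, j), (i + 1, j), (i, j - 1), (i, j + 1)]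

-- dp  = [[0 if grid[i][j] == 1 else INF for j in range(m)] for i in range(n)]
def pvDp0 (grid : List (List Int)) (n m : Int) : List (List Int) :=
  (PySem.List.pyRange 0 n 1).map (fun i => (PySem.List.pyRange 0 m 1).map (fun j =>
    if pvCell grid i j = 1 then (0 : Int) else n * m + 1))

-- ndp = [[min([dp[i][j]] + [dp[x][y] + 1 for in-bounds neighbours]) if grid[i][j] == 0 else dp[i][j] …]]
def pvStepDp (grid : List (List Int)) (n m : Int) (dp : List (List Int)) : List (List Int) :=
  (PySem.List.pyRange 0 n 1).map (fun i => (PySem.List.pyRange 0 m 1).map (fun j =>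
    if pvCell grid i j = 0 then
      (PySem.List.min? (pvCell dp i j ::
        ((pvNbr4 i j).filter (fun p => decide (0 ≤ p.1 ∧ p.1 < n ∧ 0 ≤ p.2 ∧ p.2 < m))).map
          (fun p => pvCell dp p.1 p.2 + 1)) (fun x => x)).getD 0
    else pvCell dp i j))

-- 'for _ in range(n*m): ndp = …; if ndp == dp: break; dp = ndp'
def pvLoopB (grid : List (List Int)) (n m : Int) : Nat → List (List Int) → List (List Int)
  | 0, dp => dp
  | fuel + 1, dp =>
    let ndp := pvStepDp grid n m dp
    if ndp = dp then dp else pvLoopB grid n m fuel ndp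

def maxDistance_alt (grid : List (List Int)) : Int :=
  let n : Int := grid.length
  let m : Int := (PySem.List.pyGetD grid 0 []).length
  let land := pvCellsEq grid n m 1
  if land = [] ∨ (land.length : Int) = n * m then -1
  else
    let dp := pvLoopB grid n m (grid.length * (PySem.List.pyGetD grid 0 []).length) (pvDp0 grid n m)
    (PySem.List.max? ((dp.flatMap (fun row => row)).filter (fun v => decide (v < n * m + 1)))
      (fun x => x)).getD 0

-- ===== PRECONDITION & SPEC =====
-- Pre_ excludes the inputs on which the Python A raises IndexError (grids with a row shorter
-- than row 0, via grid[i][j]); it also excludes the empty grid [], on which A happens to return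
-- -1 only because its comprehension never evaluates len(grid[0]), while B's natural
-- 'len(grid[0])' raises IndexError there.
def Pre_maxDistance (grid : List (List Int)) : Prop :=
  grid ≠ [] ∧ ∀ row ∈ grid, (grid.headD []).length ≤ row.length
instance (grid : List (List Int)) : Decidable (Pre_maxDistance grid) := by
  unfold Pre_maxDistance; infer_instance
def pvWitness_maxDistance : List (List Int) := [[1, 0], [0, 0]]

def Spec_maxDistance (grid : List (List Int)) (out : Int) : Prop := out = maxDistance_alt grid
instance (grid : List (List Int)) (out : Int) : Decidable (Spec_maxDistance grid out) := by
  unfold Spec_maxDistance; infer_instance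

-- ===== CLAIM (what is proved, stated in full; the proofs are below) =====
def Claim_equal_maxDistance : Prop :=
  ∀ (grid : List (List Int)), Dom_maxDistance grid → Pre_maxDistance grid →
    Spec_maxDistance grid (maxDistance grid)

-- ===== LEMMAS AND PROOFS =====

-- in-bounds cell
def pvInB (n m : Int) (z : Int × Int) : Prop :=
  0 ≤ z.1 ∧ z.1 < n ∧ 0 ≤ z.2 ∧ z.2 < m

-- in-bounds water cell
def pvGood (grid : List (List Int)) (n m : Int) (z : Int × Int) : Prop :=
  0 ≤ z.1 ∧ z.1 < n ∧ 0 ≤ z.2 ∧ z.2 < m ∧ pvCell grid z.1 z.2 = 0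

-- the four neighbour cells of c, in A's direction order
def pvNbrTuples (c : Int × Int) : List (Int × Int) :=
  [(c.1 + 1, c.2), (c.1 - 1, c.2), (c.1, c.2 + 1), (c.1, c.2 - 1)]

-- z is a good neighbour of some cell of S
def pvLNbr (grid : List (List Int)) (n m : Int) (S : List (Int × Int)) (z : Int × Int) : Prop :=
  ∃ c ∈ S, z ∈ pvNbrTuples c ∧ pvGood grid n m z

-- well-formed visit matrix: shape n × m, entries 0/1
def pvVisOk (n m : Int) (v : List (List Int)) : Prop :=
  ((v.length : Int) = n ∧ ∀ row ∈ v, (row.length : Int) = m) ∧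
  ∀ z : Int × Int, 0 ≤ z.1 → 0 ≤ z.2 → (pvCell v z.1 z.2 = 0 ∨ pvCell v z.1 z.2 = 1)

lemma pvVisSet_get (n m : Int) (v : List (List Int)) (hv : pvVisOk n m v)
    (x y : Int) (hx0 : 0 ≤ x) (hxn : x < n) (hy0 : 0 ≤ y) (hym : y < m) (a b : Int)
    (ha : 0 ≤ a) (hb : 0 ≤ b) :
    pvCell (pvVisSet v x y) a b = if a = x ∧ b = y then 1 else pvCell v a b := by
  obtain ⟨⟨hlen, hrows⟩, _⟩ := hv
  have hxlt : x.toNat < v.length := by omega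
  have hrowmem : PySem.List.pyGetD v x [] ∈ v := by
    rw [show x = ((x.toNat : Nat) : Int) by omega, PySem.List.pyGetD_natCast]
    rw [List.getD_eq_getElem?_getD, List.getElem?_eq_getElem hxlt]
    exact List.getElem_mem hxlt
  have hrowlen : y.toNat < (PySem.List.pyGetD v x []).length := by
    have := hrows _ hrowmem; omega
  unfold pvCell pvVisSet
  rw [show x = ((x.toNat : Nat) : Int) by omega, show y = ((y.toNat : Nat) : Int) by omega,
      show a = ((a.toNat : Nat) : Int) by omega, show b = ((b.toNat : Nat) : Int) by omega]
  rw [PySem.List.pyGetD_pySetD_natCast _ _ _ _ _ hxlt]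
  by_cases hax : a.toNat = x.toNat
  · rw [if_pos hax]
    rw [PySem.List.pyGetD_pySetD_natCast _ _ _ _ _ (by
      rw [show ((x.toNat : Nat) : Int) = x by omega]; exact hrowlen)]
    by_cases hby : b.toNat = y.toNat
    · rw [if_pos hby, if_pos ⟨by omega, by omega⟩]
    · rw [if_neg hby, if_neg (by intro h; exact hby (by omega)), hax]
  · rw [if_neg hax, if_neg (by intro h; exact hax (by omega))]

lemma pvVisSet_ok (n m : Int) (v : List (List Int)) (hv : pvVisOk n m v)
    (x y : Int) (hx0 : 0 ≤ x) (hxn : x < n) (hy0 : 0 ≤ y) (hym : y < m) :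
    pvVisOk n m (pvVisSet v x y) := by
  obtain ⟨⟨hlen, hrows⟩, h01⟩ := hv
  refine ⟨⟨?_, ?_⟩, ?_⟩
  · rw [pvVisSet, PySem.List.length_pySetD]; exact hlen
  · intro row hrow
    rw [pvVisSet, PySem.List.pySetD_of_nonneg _ _ hx0] at hrow
    rcases List.mem_or_eq_of_mem_set hrow with h | h
    · exact hrows _ h
    · subst h; rw [PySem.List.length_pySetD]
      have hxlt : x.toNat < v.length := by omega
      apply hrows
      rw [show x = ((x.toNat : Nat) : Int) by omega, PySem.List.pyGetD_natCast]
      rw [List.getD_eq_getElem?_getD, List.getElem?_eq_getElem hxlt]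
      exact List.getElem_mem hxlt
  · intro z hz1 hz2
    rw [pvVisSet_get n m v ⟨⟨hlen, hrows⟩, h01⟩ x y hx0 hxn hy0 hym z.1 z.2 hz1 hz2]
    split_ifs
    · right; rfl
    · exact h01 z hz1 hz2

-- characterisation of folding pvMark over any candidate list
lemma pvMarkFold_spec (grid : List (List Int)) (n m : Int) :
    ∀ (cands : List (Int × Int)) (q : List (Int × Int)) (v : List (List Int)),
    pvVisOk n m v →
    ∃ nc,
      (cands.foldl (pvMark grid n m) (q, v)).1 = q ++ nc ∧
      (∀ z, z ∈ nc ↔ z ∈ cands ∧ pvGood grid n m z ∧ pvCell v z.1 z.2 = 0) ∧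
      (∀ z : Int × Int, 0 ≤ z.1 → 0 ≤ z.2 → (pvCell (cands.foldl (pvMark grid n m) (q, v)).2 z.1 z.2 = 1 ↔
        pvCell v z.1 z.2 = 1 ∨ (z ∈ cands ∧ pvGood grid n m z))) ∧
      pvVisOk n m (cands.foldl (pvMark grid n m) (q, v)).2 := by
  intro cands
  induction cands with
  | nil =>
    intro q v hv
    exact ⟨[], by simp, by simp, by simp, hv⟩
  | cons p rest ih =>
    intro q v hv
    by_cases hc : pvGood grid n m p ∧ pvCell v p.1 p.2 = 0
    · have hGp := hc.1
      obtain ⟨hp1, hpn, hp2, hpm, hpw⟩ := hGp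
      have hstep : pvMark grid n m (q, v) p = (q ++ [p], pvVisSet v p.1 p.2) := by
        rw [pvMark, if_pos ⟨hp1, hpn, hp2, hpm, hpw, hc.2⟩]
      have hv1 : pvVisOk n m (pvVisSet v p.1 p.2) := pvVisSet_ok n m v hv _ _ hp1 hpn hp2 hpm
      have hget := pvVisSet_get n m v hv p.1 p.2 hp1 hpn hp2 hpm
      obtain ⟨nc', he, hmem, hvis, hok⟩ := ih (q ++ [p]) (pvVisSet v p.1 p.2) hv1
      refine ⟨p :: nc', ?_, ?_, ?_, ?_⟩
      · simp only [List.foldl_cons, hstep]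
        rw [he]; simp
      · intro z
        simp only [List.mem_cons]
        constructor
        · rintro (rfl | hz)
          · exact ⟨Or.inl rfl, hc.1, hc.2⟩
          · obtain ⟨hzr, hzg, hz0⟩ := (hmem z).1 hz
            obtain ⟨hz1, hzn, hz2, hzm, hzw⟩ := hzg
            rw [hget z.1 z.2 hz1 hz2] at hz0
            split_ifs at hz0 with hcase
            · exact absurd hz0 (by norm_num)
            · exact ⟨Or.inr hzr, ⟨hz1, hzn, hz2, hzm, hzw⟩, hz0⟩
        · rintro ⟨(rfl | hzr), hzg, hz0⟩
          · exact Or.inl rfl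
          · by_cases hzp : z = p
            · exact Or.inl hzp
            · refine Or.inr ((hmem z).2 ⟨hzr, hzg, ?_⟩)
              obtain ⟨hz1, hzn, hz2, hzm, hzw⟩ := hzg
              rw [hget z.1 z.2 hz1 hz2, if_neg ?_]
              · exact hz0
              · rintro ⟨e1, e2⟩
                exact hzp (Prod.ext e1 e2)
      · intro z hz1 hz2
        simp only [List.foldl_cons, hstep]
        rw [hvis z hz1 hz2, hget z.1 z.2 hz1 hz2]
        constructor
        · rintro (h | h)
          · split_ifs at h with hcase
            · obtain ⟨e1, e2⟩ := hcase
              have : z = p := Prod.ext e1 e2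
              subst this
              exact Or.inr ⟨List.mem_cons_self, hc.1⟩
            · exact Or.inl h
          · exact Or.inr ⟨List.mem_cons_of_mem _ h.1, h.2⟩
        · rintro (h | ⟨hmem', hg⟩)
          · left; split_ifs with hcase
            · rfl
            · exact h
          · rcases List.mem_cons.1 hmem' with rfl | hr
            · left; rw [if_pos ⟨rfl, rfl⟩]
            · exact Or.inr ⟨hr, hg⟩
      · simpa only [List.foldl_cons, hstep] using hok
    · have hstep : pvMark grid n m (q, v) p = (q, v) := by
        rw [pvMark, if_neg]
        intro ⟨h1, h2, h3, h4, h5, h6⟩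
        exact hc ⟨⟨h1, h2, h3, h4, h5⟩, h6⟩
      obtain ⟨nc', he, hmem, hvis, hok⟩ := ih q v hv
      refine ⟨nc', ?_, ?_, ?_, ?_⟩
      · simpa only [List.foldl_cons, hstep] using he
      · intro z
        rw [hmem z]
        simp only [List.mem_cons]
        constructor
        · rintro ⟨hzr, hzg, hz0⟩
          exact ⟨Or.inr hzr, hzg, hz0⟩
        · rintro ⟨(rfl | hzr), hzg, hz0⟩
          · exact absurd ⟨hzg, hz0⟩ hc
          · exact ⟨hzr, hzg, hz0⟩
      · intro z hz1 hz2
        simp only [List.foldl_cons, hstep]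
        rw [hvis z hz1 hz2]
        simp only [List.mem_cons]
        constructor
        · rintro (h | ⟨hr, hg⟩)
          · exact Or.inl h
          · exact Or.inr ⟨Or.inr hr, hg⟩
        · rintro (h | ⟨(rfl | hr), hg⟩)
          · exact Or.inl h
          · rcases hv.2 z hz1 hz2 with h0 | h1
            · exact absurd ⟨hg, h0⟩ hc
            · exact Or.inl h1
          · exact Or.inr ⟨hr, hg⟩
      · simpa only [List.foldl_cons, hstep] using hok

lemma pvLNbr_cons (grid : List (List Int)) (n m : Int) (c : Int × Int)
    (S : List (Int × Int)) (z : Int × Int) :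
    pvLNbr grid n m (c :: S) z ↔ (z ∈ pvNbrTuples c ∧ pvGood grid n m z) ∨ pvLNbr grid n m S z := by
  simp only [pvLNbr, List.mem_cons]
  constructor
  · rintro ⟨c', (rfl | hc'), hz⟩
    · exact Or.inl hz
    · exact Or.inr ⟨c', hc', hz⟩
  · rintro (hz | ⟨c', hc', hz⟩)
    · exact ⟨c, Or.inl rfl, hz⟩
    · exact ⟨c', Or.inr hc', hz⟩

lemma pvExpand_eq_fold (grid : List (List Int)) (n m : Int) (cur : Int × Int)
    (st : List (Int × Int) × List (List Int)) :
    pvExpand grid n m cur st = (pvNbrTuples cur).foldl (pvMark grid n m) st := by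
  rw [pvExpand, show pvNbrTuples cur = pvDirs.map (fun d => (cur.1 + d.1, cur.2 + d.2)) by
    simp [pvNbrTuples, pvDirs, sub_eq_add_neg], List.foldl_map]

-- one whole layer of A
lemma pvRunLayer_spec (grid : List (List Int)) (n m : Int) :
    ∀ (pending extra : List (Int × Int)) (v : List (List Int)),
    pvVisOk n m v →
    (∀ z, z ∈ (pvRunLayer grid n m pending.length (pending ++ extra) v).1 ↔
        z ∈ extra ∨ (pvLNbr grid n m pending z ∧ pvCell v z.1 z.2 = 0)) ∧
    (∀ z : Int × Int, 0 ≤ z.1 → 0 ≤ z.2 →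
        (pvCell (pvRunLayer grid n m pending.length (pending ++ extra) v).2 z.1 z.2 = 1 ↔
          pvCell v z.1 z.2 = 1 ∨ pvLNbr grid n m pending z)) ∧
    pvVisOk n m (pvRunLayer grid n m pending.length (pending ++ extra) v).2 := by
  intro pending
  induction pending with
  | nil =>
    intro extra v hv
    simp only [List.length_nil, List.nil_append, pvRunLayer]
    refine ⟨fun z => ?_, fun z _ _ => ?_, hv⟩
    · simp [pvLNbr]
    · simp [pvLNbr]
  | cons c ps ih =>
    intro extra v hv
    simp only [List.length_cons, List.cons_append, pvRunLayer]
    rw [pvExpand_eq_fold]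
    obtain ⟨nc, he, hmem, hvis, hok⟩ := pvMarkFold_spec grid n m (pvNbrTuples c) (ps ++ extra) v hv
    set st := (pvNbrTuples c).foldl (pvMark grid n m) (ps ++ extra, v) with hst
    have he' : st.1 = ps ++ (extra ++ nc) := by rw [he, List.append_assoc]
    rw [he']
    obtain ⟨ihmem, ihvis, ihok⟩ := ih (extra ++ nc) st.2 hok
    have hv01 := hv.2
    have hst01 := hok.2
    refine ⟨fun z => ?_, fun z hz1 hz2 => ?_, ihok⟩
    · rw [ihmem z, pvLNbr_cons]
      constructor
      · rintro (hz | ⟨hLz, hst0⟩)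
        · rcases List.mem_append.1 hz with hz | hz
          · exact Or.inl hz
          · obtain ⟨hnb, hg, hv0⟩ := (hmem z).1 hz
            exact Or.inr ⟨Or.inl ⟨hnb, hg⟩, hv0⟩
        · have hg : pvGood grid n m z := by
            obtain ⟨c', _, _, hg⟩ := hLz
            exact hg
          obtain ⟨hz1, hzn, hz2, hzm, hzw⟩ := hg
          have hne1 : ¬ pvCell st.2 z.1 z.2 = 1 := by rw [hst0]; norm_num
          rw [hvis z hz1 hz2] at hne1
          push Not at hne1
          have hv0 : pvCell v z.1 z.2 = 0 := by
            rcases hv01 z hz1 hz2 with h | h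
            · exact h
            · exact absurd h hne1.1
          exact Or.inr ⟨Or.inr hLz, hv0⟩
      · rintro (hz | ⟨(⟨hnb, hg⟩ | hLz), hv0⟩)
        · exact Or.inl (List.mem_append.2 (Or.inl hz))
        · exact Or.inl (List.mem_append.2 (Or.inr ((hmem z).2 ⟨hnb, hg, hv0⟩)))
        · have hg : pvGood grid n m z := by
            obtain ⟨c', _, _, hg⟩ := hLz
            exact hg
          obtain ⟨hz1, hzn, hz2, hzm, hzw⟩ := hg
          by_cases hnb : z ∈ pvNbrTuples c ∧ pvGood grid n m z
          · exact Or.inl (List.mem_append.2 (Or.inr ((hmem z).2 ⟨hnb.1, hnb.2, hv0⟩)))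
          · refine Or.inr ⟨hLz, ?_⟩
            rcases hst01 z hz1 hz2 with h | h
            · exact h
            · rw [hvis z hz1 hz2] at h
              rcases h with h | h
              · rw [h] at hv0; norm_num at hv0
              · exact absurd h hnb
    · rw [ihvis z hz1 hz2, hvis z hz1 hz2, pvLNbr_cons]
      tauto

-- ---------- neighbour relation ----------

lemma pvNbr_symm (z c : Int × Int) : z ∈ pvNbrTuples c ↔ c ∈ pvNbrTuples z := by
  simp only [pvNbrTuples, List.mem_cons, List.not_mem_nil, or_false, Prod.ext_iff]
  omega

lemma pvNbr4_iff (z c : Int × Int) : c ∈ pvNbr4 z.1 z.2 ↔ c ∈ pvNbrTuples z := by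
  simp only [pvNbr4, pvNbrTuples, List.mem_cons, List.not_mem_nil, or_false]
  tauto

-- ---------- membership / counting for the comprehension lists ----------

lemma pvCellsEq_mem (grid : List (List Int)) (n m c : Int) (z : Int × Int) :
    z ∈ pvCellsEq grid n m c ↔
      0 ≤ z.1 ∧ z.1 < n ∧ 0 ≤ z.2 ∧ z.2 < m ∧ pvCell grid z.1 z.2 = c := by
  simp only [pvCellsEq, List.mem_flatMap, List.mem_map, List.mem_filter,
    PySem.List.mem_pyRange_one, decide_eq_true_eq]
  constructor
  · rintro ⟨i, ⟨hi0, hin⟩, j, ⟨⟨hj0, hjm⟩, hc⟩, rfl⟩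
    exact ⟨hi0, hin, hj0, hjm, hc⟩
  · rintro ⟨h1, h2, h3, h4, h5⟩
    exact ⟨z.1, ⟨h1, h2⟩, z.2, ⟨⟨h3, h4⟩, h5⟩, rfl⟩

-- all cells of the rectangle, row-major
def pvAllCells (n m : Int) : List (Int × Int) :=
  (PySem.List.pyRange 0 n 1).flatMap (fun i => (PySem.List.pyRange 0 m 1).map (fun j => (i, j)))

lemma pvAllCells_mem (n m : Int) (z : Int × Int) :
    z ∈ pvAllCells n m ↔ pvInB n m z := by
  simp only [pvAllCells, List.mem_flatMap, List.mem_map, PySem.List.mem_pyRange_one, pvInB]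
  constructor
  · rintro ⟨i, ⟨hi0, hin⟩, j, ⟨hj0, hjm⟩, rfl⟩
    exact ⟨hi0, hin, hj0, hjm⟩
  · rintro ⟨h1, h2, h3, h4⟩
    exact ⟨z.1, ⟨h1, h2⟩, z.2, ⟨h3, h4⟩, rfl⟩

lemma pvAllCells_length (n m : Int) (hn : 0 ≤ n) (hm : 0 ≤ m) :
    ((pvAllCells n m).length : Int) = n * m := by
  rw [pvAllCells, List.length_flatMap]
  have hmap : ∀ i ∈ PySem.List.pyRange 0 n 1,
      ((PySem.List.pyRange 0 m 1).map (fun j => (i, j))).length = m.toNat := by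
    intro i _
    rw [List.length_map, PySem.List.length_pyRange_one]
    omega
  rw [List.map_congr_left (by intro i hi; exact hmap i hi)]
  rw [List.map_const', List.sum_replicate, smul_eq_mul, PySem.List.length_pyRange_one]
  have h1 : (((n - 0).toNat) : Int) = n := by omega
  have h2 : ((m.toNat) : Int) = m := by omega
  push_cast
  rw [h1, h2]

-- ---------- BFS reachability, layer by layer ----------

-- reach k z: z is land, or water reachable from land in at most k BFS steps
def pvReach (grid : List (List Int)) (n m : Int) : Nat → (Int × Int) → Prop
  | 0, z => pvInB n m z ∧ pvCell grid z.1 z.2 = 1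
  | k + 1, z => pvReach grid n m k z ∨
      (pvInB n m z ∧ pvCell grid z.1 z.2 = 0 ∧ ∃ c, pvReach grid n m k c ∧ z ∈ pvNbrTuples c)

-- frontier k z: z first becomes reachable at exactly k steps
def pvFrontier (grid : List (List Int)) (n m : Int) (k : Nat) (z : Int × Int) : Prop :=
  pvReach grid n m k z ∧ ∀ j < k, ¬ pvReach grid n m j z

lemma pvReach_inb (grid : List (List Int)) (n m : Int) :
    ∀ (k : Nat) (z : Int × Int), pvReach grid n m k z → pvInB n m z := by
  intro k
  induction k with
  | zero => intro z hz; exact hz.1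
  | succ k ih =>
    intro z hz
    rcases hz with hz | hz
    · exact ih z hz
    · exact hz.1

lemma pvReach_mono (grid : List (List Int)) (n m : Int) :
    ∀ (j k : Nat), j ≤ k → ∀ z, pvReach grid n m j z → pvReach grid n m k z := by
  intro j k hjk
  induction k with
  | zero =>
    intro z hz
    rwa [Nat.le_zero.1 hjk] at hz
  | succ k ih =>
    intro z hz
    rcases Nat.lt_or_ge j (k + 1) with h | h
    · exact Or.inl (ih (by omega) z hz)
    · rwa [show j = k + 1 by omega] at hz

lemma pvReach_minlayer (grid : List (List Int)) (n m : Int) :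
    ∀ (k : Nat) (z : Int × Int), pvReach grid n m k z →
      ∃ j, j ≤ k ∧ pvFrontier grid n m j z := by
  intro k
  induction k using Nat.strong_induction_on with
  | _ k ih =>
    intro z hz
    by_cases h : ∃ j, j < k ∧ pvReach grid n m j z
    · obtain ⟨j, hj, hr⟩ := h
      obtain ⟨i, hi, hf⟩ := ih j hj z hr
      exact ⟨i, by omega, hf⟩
    · push Not at h
      exact ⟨k, le_rfl, hz, fun j hj hr => h j hj hr⟩

lemma pvFrontier_unique (grid : List (List Int)) (n m : Int) (j k : Nat) (z : Int × Int)
    (hj : pvFrontier grid n m j z) (hk : pvFrontier grid n m k z) : j = k := by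
  by_contra hne
  rcases Nat.lt_or_ge j k with h | h
  · exact hk.2 j h hj.1
  · exact hj.2 k (by omega) hk.1

lemma pvFrontier_water (grid : List (List Int)) (n m : Int) (k : Nat) (z : Int × Int)
    (h : pvFrontier grid n m (k + 1) z) :
    pvInB n m z ∧ pvCell grid z.1 z.2 = 0 ∧
      ∃ c, pvFrontier grid n m k c ∧ z ∈ pvNbrTuples c := by
  obtain ⟨hr, hmin⟩ := h
  rcases hr with hr | ⟨hib, h0, c, hrc, hnb⟩
  · exact absurd hr (hmin k (by omega))
  · obtain ⟨j, hj, hfc⟩ := pvReach_minlayer grid n m k c hrc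
    rcases Nat.lt_or_ge j k with hlt | hge
    · exfalso
      apply hmin (j + 1) (by omega)
      exact Or.inr ⟨hib, h0, c, hfc.1, hnb⟩
    · rw [show j = k by omega] at hfc
      exact ⟨hib, h0, c, hfc, hnb⟩

lemma pvFrontier_downex (grid : List (List Int)) (n m : Int) (k : Nat)
    (h : ∃ z, pvFrontier grid n m (k + 1) z) : ∃ c, pvFrontier grid n m k c := by
  obtain ⟨z, hz⟩ := h
  obtain ⟨_, _, c, hc, _⟩ := pvFrontier_water grid n m k z hz
  exact ⟨c, hc⟩

lemma pvFrontier_exdown (grid : List (List Int)) (n m : Int) :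
    ∀ (K k : Nat), k ≤ K → (∃ z, pvFrontier grid n m K z) → ∃ z, pvFrontier grid n m k z := by
  intro K
  induction K with
  | zero =>
    intro k hk h
    rwa [Nat.le_zero.1 hk]
  | succ K ih =>
    intro k hk h
    rcases Nat.lt_or_ge k (K + 1) with hlt | hge
    · exact ih k (by omega) (pvFrontier_downex grid n m K h)
    · rwa [show k = K + 1 by omega]

-- representatives of the layers 0..k: k+1 distinct in-bounds cells
lemma pvFrontier_reps (grid : List (List Int)) (n m : Int) :
    ∀ (k : Nat) (z : Int × Int), pvFrontier grid n m k z →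
      ∃ l : List (Int × Int), l.length = k + 1 ∧ l.Nodup ∧
        ∀ y ∈ l, pvInB n m y ∧ ∃ j, j ≤ k ∧ pvFrontier grid n m j y := by
  intro k
  induction k with
  | zero =>
    intro z hz
    refine ⟨[z], rfl, List.nodup_singleton z, ?_⟩
    intro y hy
    rw [List.mem_singleton] at hy
    subst hy
    exact ⟨pvReach_inb grid n m 0 y hz.1, 0, le_rfl, hz⟩
  | succ k ih =>
    intro z hz
    obtain ⟨hib, h0, c, hc, hnb⟩ := pvFrontier_water grid n m k z hz
    obtain ⟨l, hlen, hnd, hmem⟩ := ih c hc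
    refine ⟨z :: l, by simp [hlen], ?_, ?_⟩
    · rw [List.nodup_cons]
      refine ⟨?_, hnd⟩
      intro hzl
      obtain ⟨_, j, hj, hfj⟩ := hmem z hzl
      have := pvFrontier_unique grid n m j (k + 1) z hfj hz
      omega
    · intro y hy
      rcases List.mem_cons.1 hy with rfl | hy
      · exact ⟨hib, k + 1, le_rfl, hz⟩
      · obtain ⟨hyb, j, hj, hfj⟩ := hmem y hy
        exact ⟨hyb, j, by omega, hfj⟩

lemma pvFrontier_cap (grid : List (List Int)) (n m : Int) (hn : 0 ≤ n) (hm : 0 ≤ m)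
    (k : Nat) (z : Int × Int) (h : pvFrontier grid n m k z) : (k : Int) + 1 ≤ n * m := by
  obtain ⟨l, hlen, hnd, hmem⟩ := pvFrontier_reps grid n m k z h
  have hsub : l ⊆ pvAllCells n m := by
    intro y hy
    exact (pvAllCells_mem n m y).2 (hmem y hy).1
  have hle := (List.Nodup.subperm hnd hsub).length_le
  have hal := pvAllCells_length n m hn hm
  omega

-- ---------- the dp matrix of B ----------

-- a generic n × m matrix built by comprehension
def pvGridMap (n m : Int) (f : Int → Int → Int) : List (List Int) :=
  (PySem.List.pyRange 0 n 1).map (fun i => (PySem.List.pyRange 0 m 1).map (fun j => f i j))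

lemma pvGridMap_get (n m : Int) (f : Int → Int → Int) (i j : Int)
    (hi0 : 0 ≤ i) (hin : i < n) (hj0 : 0 ≤ j) (hjm : j < m) :
    pvCell (pvGridMap n m f) i j = f i j := by
  unfold pvCell pvGridMap
  rw [PySem.List.pyGetD_map_pyRange_of_nonneg _ _ _ _ hi0 hin,
      PySem.List.pyGetD_map_pyRange_of_nonneg _ _ _ _ hj0 hjm]

lemma pvGridMap_flat_mem (n m : Int) (f : Int → Int → Int) (x : Int) :
    x ∈ (pvGridMap n m f).flatMap (fun row => row) ↔
      ∃ i j, 0 ≤ i ∧ i < n ∧ 0 ≤ j ∧ j < m ∧ x = f i j := by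
  constructor
  · intro hx
    rw [pvGridMap, List.mem_flatMap] at hx
    obtain ⟨row, hrow, hxr⟩ := hx
    rw [List.mem_map] at hrow
    obtain ⟨i, hi, rfl⟩ := hrow
    rw [PySem.List.mem_pyRange_one] at hi
    rw [List.mem_map] at hxr
    obtain ⟨j, hj, hfj⟩ := hxr
    rw [PySem.List.mem_pyRange_one] at hj
    exact ⟨i, j, hi.1, hi.2, hj.1, hj.2, hfj.symm⟩
  · rintro ⟨i, j, hi0, hin, hj0, hjm, rfl⟩
    rw [pvGridMap, List.mem_flatMap]
    refine ⟨(PySem.List.pyRange 0 m 1).map (fun j => f i j), ?_, ?_⟩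
    · exact List.mem_map_of_mem (by rw [PySem.List.mem_pyRange_one]; exact ⟨hi0, hin⟩)
    · exact List.mem_map_of_mem (by rw [PySem.List.mem_pyRange_one]; exact ⟨hj0, hjm⟩)

-- the dp0 / step bodies, seen as grid comprehensions
def pvDp0Fun (grid : List (List Int)) (n m : Int) (i j : Int) : Int :=
  if pvCell grid i j = 1 then (0 : Int) else n * m + 1

def pvStepFun (grid : List (List Int)) (n m : Int) (dp : List (List Int)) (i j : Int) : Int :=
  if pvCell grid i j = 0 then
    (PySem.List.min? (pvCell dp i j ::
      ((pvNbr4 i j).filter (fun p => decide (0 ≤ p.1 ∧ p.1 < n ∧ 0 ≤ p.2 ∧ p.2 < m))).map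
        (fun p => pvCell dp p.1 p.2 + 1)) (fun x => x)).getD 0
  else pvCell dp i j

lemma pvDp0_eq (grid : List (List Int)) (n m : Int) :
    pvDp0 grid n m = pvGridMap n m (pvDp0Fun grid n m) := rfl

lemma pvStepDp_eq (grid : List (List Int)) (n m : Int) (dp : List (List Int)) :
    pvStepDp grid n m dp = pvGridMap n m (pvStepFun grid n m dp) := rfl

-- the dp iterates
def pvDpSeq (grid : List (List Int)) (n m : Int) : Nat → List (List Int)
  | 0 => pvDp0 grid n m
  | k + 1 => pvStepDp grid n m (pvDpSeq grid n m k)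

lemma pvDpSeq_isGrid (grid : List (List Int)) (n m : Int) (k : Nat) :
    ∃ f, pvDpSeq grid n m k = pvGridMap n m f := by
  cases k with
  | zero => exact ⟨pvDp0Fun grid n m, pvDp0_eq grid n m⟩
  | succ k => exact ⟨pvStepFun grid n m (pvDpSeq grid n m k), pvStepDp_eq grid n m _⟩

-- a fixed point of the relaxation stays fixed
lemma pvDpSeq_fixed (grid : List (List Int)) (n m : Int) (k : Nat)
    (h : pvDpSeq grid n m (k + 1) = pvDpSeq grid n m k) :
    ∀ t, pvDpSeq grid n m (k + t) = pvDpSeq grid n m k := by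
  intro t
  induction t with
  | zero => rfl
  | succ t ih =>
    have : pvDpSeq grid n m (k + (t + 1)) = pvStepDp grid n m (pvDpSeq grid n m (k + t)) := rfl
    rw [this, ih]
    exact h

-- the while loop with early break computes exactly the fuel-th iterate
lemma pvLoopB_eq_seq (grid : List (List Int)) (n m : Int) :
    ∀ (fuel k : Nat), pvLoopB grid n m fuel (pvDpSeq grid n m k) = pvDpSeq grid n m (k + fuel) := by
  intro fuel
  induction fuel with
  | zero => intro k; rfl
  | succ f ih =>
    intro k
    simp only [pvLoopB]
    by_cases h : pvStepDp grid n m (pvDpSeq grid n m k) = pvDpSeq grid n m k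
    · rw [if_pos h]
      exact (pvDpSeq_fixed grid n m k h (f + 1)).symm
    · rw [if_neg h]
      have h1 : pvStepDp grid n m (pvDpSeq grid n m k) = pvDpSeq grid n m (k + 1) := rfl
      rw [h1, ih (k + 1)]
      congr 1
      omega

-- smallest element of a nonempty min-candidate list
lemma pvMinConsD (x : Int) (t : List Int) (v : Int)
    (hm : v = x ∨ v ∈ t) (hx : v ≤ x) (ht : ∀ y ∈ t, v ≤ y) :
    (PySem.List.min? (x :: t) (fun y => y)).getD 0 = v := by
  cases h : PySem.List.min? (x :: t) (fun y => y) with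
  | none =>
    rw [PySem.List.min?_eq_none_iff] at h
    exact absurd h (by simp)
  | some w =>
    have hwmem := PySem.List.min?_mem h
    have hwmin := PySem.List.min?_isMin h
    simp only [Option.getD_some]
    have h1 : v ≤ w := by
      rcases List.mem_cons.1 hwmem with rfl | hw
      · exact hx
      · exact ht _ hw
    have h2 : w ≤ v := by
      rcases hm with rfl | hv
      · simpa using hwmin v List.mem_cons_self
      · simpa using hwmin v (List.mem_cons_of_mem _ hv)
    omega

lemma pvMaxD (l : List Int) (v : Int) (hm : v ∈ l) (hub : ∀ y ∈ l, y ≤ v) :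
    (PySem.List.max? l (fun y => y)).getD 0 = v := by
  cases h : PySem.List.max? l (fun y => y) with
  | none =>
    rw [PySem.List.max?_eq_none_iff] at h
    rw [h] at hm
    exact absurd hm List.not_mem_nil
  | some w =>
    have hwmem := PySem.List.max?_mem h
    have hwmax := PySem.List.max?_isMax h
    simp only [Option.getD_some]
    have h1 : w ≤ v := hub _ hwmem
    have h2 : v ≤ w := by simpa using hwmax v hm
    omega

-- membership of the filtered neighbour-candidate list
lemma pvCand_mem (n m : Int) (dp : List (List Int)) (z : Int × Int) (y : Int) :
    y ∈ ((pvNbr4 z.1 z.2).filter (fun p => decide (0 ≤ p.1 ∧ p.1 < n ∧ 0 ≤ p.2 ∧ p.2 < m))).map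
        (fun p => pvCell dp p.1 p.2 + 1) ↔
      ∃ c, c ∈ pvNbrTuples z ∧ pvInB n m c ∧ y = pvCell dp c.1 c.2 + 1 := by
  simp only [List.mem_map, List.mem_filter, decide_eq_true_eq, pvInB]
  constructor
  · rintro ⟨c, ⟨hc4, hcb⟩, rfl⟩
    exact ⟨c, (pvNbr4_iff z c).1 hc4, hcb, rfl⟩
  · rintro ⟨c, hct, hcb, rfl⟩
    exact ⟨c, ⟨(pvNbr4_iff z c).2 hct, hcb⟩, rfl⟩

-- ---------- the dp invariant: dp_k holds each cell's BFS layer, capped by k ----------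

lemma pvDpSeq_spec (grid : List (List Int)) (n m : Int) :
    ∀ (k : Nat), (k : Int) ≤ n * m →
    ∀ z : Int × Int, pvInB n m z →
      ((∀ j : Nat, j ≤ k → pvFrontier grid n m j z →
          pvCell (pvDpSeq grid n m k) z.1 z.2 = (j : Int)) ∧
       (¬ pvReach grid n m k z → pvCell (pvDpSeq grid n m k) z.1 z.2 = n * m + 1)) := by
  intro k
  induction k with
  | zero =>
    intro _ z hz
    obtain ⟨hz1, hzn, hz2, hzm⟩ := hz
    have hget : pvCell (pvDpSeq grid n m 0) z.1 z.2 = pvDp0Fun grid n m z.1 z.2 := by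
      show pvCell (pvDp0 grid n m) z.1 z.2 = _
      rw [pvDp0_eq, pvGridMap_get n m _ z.1 z.2 hz1 hzn hz2 hzm]
    constructor
    · intro j hj hf
      rw [Nat.le_zero.1 hj] at hf
      have h1 : pvCell grid z.1 z.2 = 1 := hf.1.2
      rw [hget, pvDp0Fun, if_pos h1, Nat.le_zero.1 hj]
      simp
    · intro hnr
      have h1 : pvCell grid z.1 z.2 ≠ 1 := by
        intro h
        exact hnr ⟨⟨hz1, hzn, hz2, hzm⟩, h⟩
      rw [hget, pvDp0Fun, if_neg h1]
  | succ k ih =>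
    intro hk z hz
    have hk' : (k : Int) ≤ n * m := by push_cast at hk ⊢; omega
    obtain ⟨hz1, hzn, hz2, hzm⟩ := hz
    have hget : pvCell (pvDpSeq grid n m (k + 1)) z.1 z.2 =
        pvStepFun grid n m (pvDpSeq grid n m k) z.1 z.2 := by
      show pvCell (pvStepDp grid n m (pvDpSeq grid n m k)) z.1 z.2 = _
      rw [pvStepDp_eq, pvGridMap_get n m _ z.1 z.2 hz1 hzn hz2 hzm]
    by_cases h0 : pvCell grid z.1 z.2 = 0
    · -- water cell: the step takes the min with the neighbours
      rw [hget, pvStepFun, if_pos h0]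
      constructor
      · intro j hj hf
        rcases Nat.lt_or_ge j (k + 1) with hjk | hjk
        · -- z already settled at layer j ≤ k
          have hjk' : j ≤ k := by omega
          have hx : pvCell (pvDpSeq grid n m k) z.1 z.2 = (j : Int) :=
            (ih hk' z ⟨hz1, hzn, hz2, hzm⟩).1 j hjk' hf
          apply pvMinConsD
          · exact Or.inl hx.symm
          · rw [hx]
          · intro y hy
            obtain ⟨c, hct, hcb, rfl⟩ := (pvCand_mem n m (pvDpSeq grid n m k) z y).1 hy
            by_cases hrc : pvReach grid n m k c
            · obtain ⟨i, hi, hfi⟩ := pvReach_minlayer grid n m k c hrc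
              rw [(ih hk' c hcb).1 i hi hfi]
              by_contra hlt
              push Not at hlt
              have hib : i + 1 < j := by omega
              apply hf.2 (i + 1) hib
              exact Or.inr ⟨⟨hz1, hzn, hz2, hzm⟩, h0, c, hfi.1, (pvNbr_symm z c).2 hct⟩
            · rw [(ih hk' c hcb).2 hrc]
              push_cast at hk ⊢
              omega
        · -- z first reached now: j = k + 1
          have hj1 : j = k + 1 := by omega
          subst hj1
          have hnrk : ¬ pvReach grid n m k z := hf.2 k (by omega)
          have hx : pvCell (pvDpSeq grid n m k) z.1 z.2 = n * m + 1 :=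
            (ih hk' z ⟨hz1, hzn, hz2, hzm⟩).2 hnrk
          obtain ⟨_, _, c0, hc0, hnb0⟩ := pvFrontier_water grid n m k z hf
          have hc0b : pvInB n m c0 := pvReach_inb grid n m k c0 hc0.1
          apply pvMinConsD
          · right
            refine (pvCand_mem n m (pvDpSeq grid n m k) z _).2 ⟨c0, (pvNbr_symm c0 z).2 hnb0, hc0b, ?_⟩
            rw [(ih hk' c0 hc0b).1 k le_rfl hc0]
            push_cast
            ring
          · rw [hx]
            push_cast at hk ⊢
            omega
          · intro y hy
            obtain ⟨c, hct, hcb, rfl⟩ := (pvCand_mem n m (pvDpSeq grid n m k) z y).1 hy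
            by_cases hrc : pvReach grid n m k c
            · obtain ⟨i, hi, hfi⟩ := pvReach_minlayer grid n m k c hrc
              rw [(ih hk' c hcb).1 i hi hfi]
              have hik : i = k := by
                by_contra hik
                have : i + 1 ≤ k := by omega
                apply hnrk
                apply pvReach_mono grid n m (i + 1) k this
                exact Or.inr ⟨⟨hz1, hzn, hz2, hzm⟩, h0, c, hfi.1, (pvNbr_symm z c).2 hct⟩
              subst hik
              push_cast
              omega
            · rw [(ih hk' c hcb).2 hrc]
              push_cast at hk ⊢
              omega
      · intro hnr
        have hnrk : ¬ pvReach grid n m k z := fun h => hnr (Or.inl h)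
        have hx : pvCell (pvDpSeq grid n m k) z.1 z.2 = n * m + 1 :=
          (ih hk' z ⟨hz1, hzn, hz2, hzm⟩).2 hnrk
        apply pvMinConsD
        · exact Or.inl hx.symm
        · rw [hx]
        · intro y hy
          obtain ⟨c, hct, hcb, rfl⟩ := (pvCand_mem n m (pvDpSeq grid n m k) z y).1 hy
          by_cases hrc : pvReach grid n m k c
          · exfalso
            obtain ⟨i, hi, hfi⟩ := pvReach_minlayer grid n m k c hrc
            apply hnr
            apply pvReach_mono grid n m (i + 1) (k + 1) (by omega)
            exact Or.inr ⟨⟨hz1, hzn, hz2, hzm⟩, h0, c, hfi.1, (pvNbr_symm z c).2 hct⟩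
          · rw [(ih hk' c hcb).2 hrc]
            omega
    · -- land or wall cell: the step copies the old value
      rw [hget, pvStepFun, if_neg h0]
      constructor
      · intro j hj hf
        cases j with
        | zero => exact (ih hk' z ⟨hz1, hzn, hz2, hzm⟩).1 0 (by omega) hf
        | succ j =>
          obtain ⟨_, hw, _⟩ := pvFrontier_water grid n m j z hf
          exact absurd hw h0
      · intro hnr
        exact (ih hk' z ⟨hz1, hzn, hz2, hzm⟩).2 (fun h => hnr (Or.inl h))

-- every finite entry of a dp iterate is the layer of its cell
lemma pvDpSeq_flat_mem (grid : List (List Int)) (n m : Int) (k : Nat) (x : Int) :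
    x ∈ (pvDpSeq grid n m k).flatMap (fun row => row) ↔
      ∃ z : Int × Int, pvInB n m z ∧ x = pvCell (pvDpSeq grid n m k) z.1 z.2 := by
  obtain ⟨f, hf⟩ := pvDpSeq_isGrid grid n m k
  rw [hf, pvGridMap_flat_mem]
  constructor
  · rintro ⟨i, j, hi0, hin, hj0, hjm, rfl⟩
    exact ⟨(i, j), ⟨hi0, hin, hj0, hjm⟩,
      (pvGridMap_get n m f i j hi0 hin hj0 hjm).symm⟩
  · rintro ⟨z, ⟨hz1, hzn, hz2, hzm⟩, rfl⟩
    exact ⟨z.1, z.2, hz1, hzn, hz2, hzm,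
      pvGridMap_get n m f z.1 z.2 hz1 hzn hz2 hzm⟩

-- ---------- the BFS of A counts the layers ----------

lemma pvBfs_reach (grid : List (List Int)) (n m : Int) (K : Nat)
    (hKmax : ∀ (j : Nat) (z : Int × Int), pvFrontier grid n m j z → j ≤ K)
    (hKex : ∀ k ≤ K, ∃ z, pvFrontier grid n m k z) :
    ∀ (fuel k : Nat) (q : List (Int × Int)) (v : List (List Int)) (depth : Int),
    k ≤ K + 1 → K + 2 ≤ fuel + k →
    (∀ z, z ∈ q ↔ pvFrontier grid n m k z) →
    pvVisOk n m v →
    (∀ z : Int × Int, 0 ≤ z.1 → 0 ≤ z.2 →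
      (pvCell v z.1 z.2 = 1 ↔ pvCell grid z.1 z.2 = 0 ∧ pvReach grid n m k z)) →
    pvBfsA grid n m fuel q v depth = depth + (K : Int) - (k : Int) := by
  intro fuel
  induction fuel with
  | zero =>
    intro k q v depth hk hfuel _ _ _
    omega
  | succ f ih =>
    intro k q v depth hk hfuel hq hv hvis
    by_cases hke : k = K + 1
    · have hqe : q = [] := by
        rw [List.eq_nil_iff_forall_not_mem]
        intro z hz
        have hf := (hq z).1 hz
        rw [hke] at hf
        have := hKmax (K + 1) z hf
        omega
      simp only [pvBfsA, if_pos hqe]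
      subst hke
      push_cast
      ring
    · have hkK : k ≤ K := by omega
      have hqne : q ≠ [] := by
        obtain ⟨z, hz⟩ := hKex k hkK
        intro hqe
        have := (hq z).2 hz
        rw [hqe] at this
        exact List.not_mem_nil this
      simp only [pvBfsA, if_neg hqne]
      have hq' : q ++ [] = q := List.append_nil q
      obtain ⟨hmemA, hvisA, hokA⟩ := pvRunLayer_spec grid n m q [] v hv
      rw [hq'] at hmemA hvisA hokA
      set st := pvRunLayer grid n m q.length q v with hst
      have hstep_mem : ∀ z, z ∈ st.1 ↔ pvFrontier grid n m (k + 1) z := by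
        intro z
        rw [hmemA z]
        simp only [List.not_mem_nil, false_or]
        constructor
        · rintro ⟨⟨c, hcq, hnb, hg⟩, hv0⟩
          have hfc := (hq c).1 hcq
          obtain ⟨ha1, han, ha2, ham, hzw⟩ := hg
          have hnrk : ¬ pvReach grid n m k z := by
            intro hr
            have := (hvis z ha1 ha2).2 ⟨hzw, hr⟩
            rw [hv0] at this
            norm_num at this
          refine ⟨Or.inr ⟨⟨ha1, han, ha2, ham⟩, hzw, c, hfc.1, hnb⟩, ?_⟩
          intro j hj hr
          exact hnrk (pvReach_mono grid n m j k (by omega) z hr)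
        · intro hf
          obtain ⟨hib, hw, c, hfc, hnb⟩ := pvFrontier_water grid n m k z hf
          obtain ⟨ha1, han, ha2, ham⟩ := hib
          refine ⟨⟨c, (hq c).2 hfc, hnb, ha1, han, ha2, ham, hw⟩, ?_⟩
          rcases hv.2 z ha1 ha2 with h | h
          · exact h
          · exfalso
            exact hf.2 k (by omega) ((hvis z ha1 ha2).1 h).2
      have hstep_vis : ∀ z : Int × Int, 0 ≤ z.1 → 0 ≤ z.2 →
          (pvCell st.2 z.1 z.2 = 1 ↔
            pvCell grid z.1 z.2 = 0 ∧ pvReach grid n m (k + 1) z) := by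
        intro z hz1 hz2
        rw [hvisA z hz1 hz2]
        constructor
        · rintro (h | ⟨c, hcq, hnb, hg⟩)
          · obtain ⟨hw, hr⟩ := (hvis z hz1 hz2).1 h
            exact ⟨hw, Or.inl hr⟩
          · obtain ⟨ha1, han, ha2, ham, hzw⟩ := hg
            exact ⟨hzw, Or.inr ⟨⟨ha1, han, ha2, ham⟩, hzw, c, ((hq c).1 hcq).1, hnb⟩⟩
        · rintro ⟨hw, hr⟩
          by_cases hrk : pvReach grid n m k z
          · exact Or.inl ((hvis z hz1 hz2).2 ⟨hw, hrk⟩)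
          · rcases hr with hr | ⟨hib, _, c, hrc, hnb⟩
            · exact absurd hr hrk
            · obtain ⟨i, hi, hfi⟩ := pvReach_minlayer grid n m k c hrc
              have hik : i = k := by
                by_contra hik
                apply hrk
                apply pvReach_mono grid n m (i + 1) k (by omega)
                exact Or.inr ⟨hib, hw, c, hfi.1, hnb⟩
              subst hik
              obtain ⟨ha1, han, ha2, ham⟩ := hib
              exact Or.inr ⟨c, (hq c).2 hfi, hnb, ha1, han, ha2, ham, hw⟩
      have := ih (k + 1) st.1 st.2 (depth + 1) (by omega) (by omega) hstep_mem hokA hstep_vis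
      rw [this]
      push_cast
      ring

-- ---------- the initial state ----------

lemma pvGetD_mem_or {α : Type} (xs : List α) (k : Nat) (d : α) :
    xs.getD k d ∈ xs ∨ xs.getD k d = d := by
  rw [List.getD_eq_getElem?_getD]
  cases h : xs[k]? with
  | none => simp
  | some x => exact Or.inl (by simpa using List.mem_of_getElem? h)

lemma pvCell_zero (v : List (List Int)) (hz : ∀ row ∈ v, ∀ x ∈ row, x = 0)
    (a b : Int) (ha : 0 ≤ a) (hb : 0 ≤ b) : pvCell v a b = 0 := by
  rw [pvCell, show a = ((a.toNat : Nat) : Int) by omega, show b = ((b.toNat : Nat) : Int) by omega,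
    PySem.List.pyGetD_natCast, PySem.List.pyGetD_natCast]
  rcases pvGetD_mem_or v a.toNat [] with hrow | hrow
  · rcases pvGetD_mem_or (v.getD a.toNat []) b.toNat 0 with hx | hx
    · exact hz _ hrow _ hx
    · exact hx
  · rw [hrow]; simp

lemma pvVisit0_get (n m a b : Int) (ha : 0 ≤ a) (hb : 0 ≤ b) :
    pvCell ((PySem.List.pyRange 0 n 1).map (fun _ => (PySem.List.pyRange 0 m 1).map (fun _ => (0 : Int)))) a b = 0 := by
  apply pvCell_zero _ ?_ _ _ ha hb
  intro row hrow x hx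
  simp only [List.mem_map] at hrow
  obtain ⟨_, _, rfl⟩ := hrow
  simp only [List.mem_map] at hx
  obtain ⟨_, _, rfl⟩ := hx
  rfl

lemma pvVisit0_ok (grid : List (List Int)) :
    pvVisOk (grid.length : Int) ((PySem.List.pyGetD grid 0 []).length : Int)
      ((PySem.List.pyRange 0 (grid.length : Int) 1).map (fun _ =>
        (PySem.List.pyRange 0 ((PySem.List.pyGetD grid 0 []).length : Int) 1).map (fun _ => (0 : Int)))) := by
  refine ⟨⟨?_, ?_⟩, ?_⟩
  · rw [List.length_map, PySem.List.length_pyRange_one]; omega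
  · intro row hrow
    simp only [List.mem_map] at hrow
    obtain ⟨_, _, rfl⟩ := hrow
    rw [List.length_map, PySem.List.length_pyRange_one]; omega
  · intro z hz1 hz2
    left
    exact pvVisit0_get _ _ _ _ hz1 hz2

lemma pvBuildQ_eq (grid : List (List Int)) (n m : Int) :
    (PySem.List.pyRange 0 n 1).foldl (fun q i =>
      (PySem.List.pyRange 0 m 1).foldl (fun q j =>
        if pvCell grid i j = 1 then q ++ [(i, j)] else q) q) [] = pvCellsEq grid n m 1 := by
  have hinner : ∀ (i : Int) (q : List (Int × Int)),
      (PySem.List.pyRange 0 m 1).foldl (fun q j =>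
        if pvCell grid i j = 1 then q ++ [(i, j)] else q) q =
      q ++ ((PySem.List.pyRange 0 m 1).filter (fun j => decide (pvCell grid i j = 1))).map (fun j => (i, j)) := by
    intro i q
    exact PySem.List.foldl_append_ite (fun j => pvCell grid i j = 1) (fun j => (i, j)) _ q
  calc (PySem.List.pyRange 0 n 1).foldl (fun q i =>
        (PySem.List.pyRange 0 m 1).foldl (fun q j =>
          if pvCell grid i j = 1 then q ++ [(i, j)] else q) q) []
      = (PySem.List.pyRange 0 n 1).foldl (fun q i => q ++
          ((PySem.List.pyRange 0 m 1).filter (fun j => decide (pvCell grid i j = 1))).map (fun j => (i, j))) [] := by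
        apply PySem.List.foldl_congr_mem
        intro q i _
        exact hinner i q
    _ = pvCellsEq grid n m 1 := by
        rw [PySem.List.foldl_append_eq_flatMap, List.nil_append, pvCellsEq]

-- ===== VERDICT (by name: the statement is the Claim_ definition above) =====
theorem maxDistance_spec : Claim_equal_maxDistance := by
  intro grid _ _
  unfold Spec_maxDistance
  simp only [maxDistance, maxDistance_alt]
  set n : Int := (grid.length : Int) with hn
  set m : Int := ((PySem.List.pyGetD grid 0 []).length : Int) with hm
  have hn0 : 0 ≤ n := by rw [hn]; exact Int.natCast_nonneg _
  have hm0 : 0 ≤ m := by rw [hm]; exact Int.natCast_nonneg _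
  rw [pvBuildQ_eq grid n m]
  by_cases hLe : pvCellsEq grid n m 1 = []
  · rw [if_pos hLe, if_pos (Or.inl hLe)]
  · rw [if_neg hLe]
    by_cases hfull : ((pvCellsEq grid n m 1).length : Int) = m * n
    · rw [if_pos hfull, if_pos (Or.inr (by rw [mul_comm n m]; exact hfull))]
    · rw [if_neg hfull, if_neg (by
        rintro (h | h)
        · exact hLe h
        · exact hfull (by rw [mul_comm m n]; exact h))]
      -- dimensions are positive: some land cell is in bounds
      obtain ⟨z0, hz0⟩ := List.exists_mem_of_ne_nil _ hLe
      obtain ⟨hz01, hz0n, hz02, hz0m, hz0c⟩ := (pvCellsEq_mem grid n m 1 z0).1 hz0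
      have hn1 : 1 ≤ n := by omega
      have hm1 : 1 ≤ m := by omega
      -- K: the deepest BFS layer
      set S : Set Nat := {k | ∃ z, pvFrontier grid n m k z} with hS
      have hS0 : 0 ∈ S := by
        refine ⟨z0, ⟨⟨hz01, hz0n, hz02, hz0m⟩, hz0c⟩, ?_⟩
        intro j hj
        omega
      have hbdd : BddAbove S := by
        refine ⟨(n * m).toNat, ?_⟩
        rintro k ⟨z, hz⟩
        have := pvFrontier_cap grid n m hn0 hm0 k z hz
        omega
      set K : Nat := sSup S with hK
      have hKS : K ∈ S := Nat.sSup_mem ⟨0, hS0⟩ hbdd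
      have hKmax : ∀ (j : Nat) (z : Int × Int), pvFrontier grid n m j z → j ≤ K :=
        fun j z hf => le_csSup hbdd ⟨z, hf⟩
      have hKex : ∀ k ≤ K, ∃ z, pvFrontier grid n m k z :=
        fun k hk => pvFrontier_exdown grid n m K k hk hKS
      obtain ⟨zK, hzK⟩ := hKS
      have hKcap : (K : Int) + 1 ≤ n * m := pvFrontier_cap grid n m hn0 hm0 K zK hzK
      -- the Nat fuel / iteration count
      set NM : Nat := grid.length * (PySem.List.pyGetD grid 0 []).length with hNM
      have hNMc : (NM : Int) = n * m := by rw [hNM]; push_cast; rw [hn, hm]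
      -- A computes K
      have hA : pvBfsA grid n m (NM + 2) (pvCellsEq grid n m 1)
          ((PySem.List.pyRange 0 n 1).map (fun _ =>
            (PySem.List.pyRange 0 m 1).map (fun _ => (0 : Int)))) 0 = (K : Int) := by
        have hq0 : ∀ z, z ∈ pvCellsEq grid n m 1 ↔ pvFrontier grid n m 0 z := by
          intro z
          rw [pvCellsEq_mem]
          constructor
          · rintro ⟨h1, h2, h3, h4, h5⟩
            exact ⟨⟨⟨h1, h2, h3, h4⟩, h5⟩, fun j hj => by omega⟩
          · rintro ⟨⟨⟨h1, h2, h3, h4⟩, h5⟩, _⟩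
            exact ⟨h1, h2, h3, h4, h5⟩
        have hvis0 : ∀ z : Int × Int, 0 ≤ z.1 → 0 ≤ z.2 →
            (pvCell ((PySem.List.pyRange 0 n 1).map (fun _ =>
              (PySem.List.pyRange 0 m 1).map (fun _ => (0 : Int)))) z.1 z.2 = 1 ↔
              pvCell grid z.1 z.2 = 0 ∧ pvReach grid n m 0 z) := by
          intro z hz1 hz2
          rw [pvVisit0_get n m z.1 z.2 hz1 hz2]
          constructor
          · intro h; norm_num at h
          · rintro ⟨hw, _, hl⟩
            rw [hw] at hl
            norm_num at hl
        have := pvBfs_reach grid n m K hKmax hKex (NM + 2) 0 (pvCellsEq grid n m 1)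
          ((PySem.List.pyRange 0 n 1).map (fun _ =>
            (PySem.List.pyRange 0 m 1).map (fun _ => (0 : Int)))) 0
          (by omega) (by omega) hq0 (pvVisit0_ok grid) hvis0
        rw [this]
        push_cast
        ring
      -- B computes K
      have hB : (PySem.List.max? (((pvLoopB grid n m NM (pvDp0 grid n m)).flatMap
          (fun row => row)).filter (fun v => decide (v < n * m + 1))) (fun x => x)).getD 0
          = (K : Int) := by
        have hloop : pvLoopB grid n m NM (pvDp0 grid n m) = pvDpSeq grid n m NM := by
          have := pvLoopB_eq_seq grid n m NM 0
          simpa using this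
        rw [hloop]
        have hNMle : (NM : Int) ≤ n * m := by rw [hNMc]
        have hKNM : K ≤ NM := by omega
        have hspec := pvDpSeq_spec grid n m NM hNMle
        apply pvMaxD
        · -- K is a value of the dp matrix
          rw [List.mem_filter]
          constructor
          · rw [pvDpSeq_flat_mem]
            have hzKb : pvInB n m zK := pvReach_inb grid n m K zK hzK.1
            exact ⟨zK, hzKb, ((hspec zK hzKb).1 K hKNM hzK).symm⟩
          · rw [decide_eq_true_eq]
            omega
        · -- and every finite value is a layer number ≤ K
          intro y hy
          rw [List.mem_filter, pvDpSeq_flat_mem, decide_eq_true_eq] at hy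
          obtain ⟨⟨z, hzb, rfl⟩, hlt⟩ := hy
          by_cases hr : pvReach grid n m NM z
          · obtain ⟨j, hj, hfj⟩ := pvReach_minlayer grid n m NM z hr
            rw [(hspec z hzb).1 j hj hfj]
            have := hKmax j z hfj
            omega
          · rw [(hspec z hzb).2 hr] at hlt
            omega
      rw [hA, hB]
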